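-- pv_equiv track=rewrite | github.com/EmmaGau/extreme_events_forecasting | vae_probabilistic/model/vae_net.py | calculate_encoder_output_dims
-- ===== SOURCE A (Python) =====
-- def calculate_encoder_output_dims(input_dims, num_layers):
--     t, h, w = input_dims
--     for i in range(num_layers):
--         # Changement ici : on réduit t deux fois au lieu d'une
--         if i >= num_layers - 2:
--             t = (t - 1) // 2 + 1
--         h = (h - 1) // 2 + 1
--         w = (w - 1) // 2 + 1
--     return (t, h, w)
-- ===== SOURCE B (Python) =====
-- def calculate_encoder_output_dims(input_dims, num_layers):
--     t, h, w = input_dims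
--     n = max(num_layers, 0)
--     return ((t - 1) // 2 ** min(n, 2) + 1,
--             (h - 1) // 2 ** n + 1,
--             (w - 1) // 2 ** n + 1)
-- ===== Notes on version B (the rewrite author's own statement) =====
-- stated objective: simpler
-- what changed: Replaces the per-layer halving loop by a closed form: since applying (x-1)//2+1 k times equals (x-1)//2**k+1, each output dimension is computed directly with exponent n = max(num_layers,0) for h and w and min(n,2) for t.
import Mathlib
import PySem

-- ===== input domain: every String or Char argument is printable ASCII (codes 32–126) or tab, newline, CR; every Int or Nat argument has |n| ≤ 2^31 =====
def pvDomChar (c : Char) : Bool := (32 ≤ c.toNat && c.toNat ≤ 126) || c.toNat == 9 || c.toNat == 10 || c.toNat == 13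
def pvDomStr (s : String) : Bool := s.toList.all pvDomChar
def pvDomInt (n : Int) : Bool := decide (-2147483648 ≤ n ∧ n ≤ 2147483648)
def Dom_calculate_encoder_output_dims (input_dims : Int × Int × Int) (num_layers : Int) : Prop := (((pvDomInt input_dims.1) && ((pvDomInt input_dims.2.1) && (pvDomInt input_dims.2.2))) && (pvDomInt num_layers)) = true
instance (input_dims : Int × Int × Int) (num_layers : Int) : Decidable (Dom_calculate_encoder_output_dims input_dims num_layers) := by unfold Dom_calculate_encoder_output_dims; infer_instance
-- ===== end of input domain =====

-- B replaces A's per-layer halving loop by the closed form (x-1)//2**k + 1 per dimension (objective: simpler).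

-- ===== PORT A =====
def calculate_encoder_output_dims (input_dims : Int × Int × Int) (num_layers : Int) : Int × Int × Int :=
  (PySem.List.pyRange 0 num_layers 1).foldl
    (fun (s : Int × Int × Int) i =>
      let t := if i ≥ num_layers - 2 then PySem.Int.floordiv (s.1 - 1) 2 + 1 else s.1
      let h := PySem.Int.floordiv (s.2.1 - 1) 2 + 1
      let w := PySem.Int.floordiv (s.2.2 - 1) 2 + 1
      (t, h, w))
    (input_dims.1, input_dims.2.1, input_dims.2.2)

-- ===== PORT B =====
def calculate_encoder_output_dims_alt (input_dims : Int × Int × Int) (num_layers : Int) : Int × Int × Int :=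
  let n : Int := max num_layers 0
  (PySem.Int.floordiv (input_dims.1 - 1) (2 ^ (min n 2).toNat) + 1,
   PySem.Int.floordiv (input_dims.2.1 - 1) (2 ^ n.toNat) + 1,
   PySem.Int.floordiv (input_dims.2.2 - 1) (2 ^ n.toNat) + 1)

-- ===== PRECONDITION & SPEC =====
def Spec_calculate_encoder_output_dims (input_dims : Int × Int × Int) (num_layers : Int) (out : Int × Int × Int) : Prop := out = calculate_encoder_output_dims_alt input_dims num_layers
instance (input_dims : Int × Int × Int) (num_layers : Int) (out : Int × Int × Int) : Decidable (Spec_calculate_encoder_output_dims input_dims num_layers out) := by unfold Spec_calculate_encoder_output_dims; infer_instance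

-- ===== CLAIM (what is proved, stated in full; the proofs are below) =====
def Claim_equal_calculate_encoder_output_dims : Prop := ∀ (input_dims : Int × Int × Int) (num_layers : Int), Dom_calculate_encoder_output_dims input_dims num_layers → Spec_calculate_encoder_output_dims input_dims num_layers (calculate_encoder_output_dims input_dims num_layers)

-- ===== LEMMAS AND PROOFS =====

-- the single halving step
def pvHalve (x : Int) : Int := PySem.Int.floordiv (x - 1) 2 + 1

theorem pvHalve_iterate (k : Nat) (x : Int) :
    pvHalve^[k] x = PySem.Int.floordiv (x - 1) (2 ^ k) + 1 := by
  induction k generalizing x with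
  | zero => simp [PySem.Int.floordiv, Int.fdiv_one]
  | succ k ih =>
    rw [Function.iterate_succ_apply', ih]
    show PySem.Int.floordiv (PySem.Int.floordiv (x - 1) (2 ^ k) + 1 - 1) 2 + 1 = _
    unfold PySem.Int.floordiv
    rw [add_sub_cancel_right, Int.fdiv_fdiv_eq_fdiv_mul _ (by positivity) (by norm_num),
      pow_succ]

theorem pvFold_range (c : Int) (m : Nat) (t h w : Int) :
    (List.range m).foldl
      (fun (s : Int × Int × Int) (k : Nat) =>
        ((if (k : Int) ≥ c then pvHalve s.1 else s.1), pvHalve s.2.1, pvHalve s.2.2))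
      (t, h, w)
    = (pvHalve^[min ((m : Int) - c).toNat m] t, pvHalve^[m] h, pvHalve^[m] w) := by
  induction m with
  | zero => simp
  | succ m ih =>
    rw [List.range_succ, List.foldl_append, ih]
    simp only [List.foldl_cons, List.foldl_nil]
    by_cases hc : (m : Int) ≥ c
    · rw [if_pos (by exact_mod_cast hc)]
      have h1 : min (((m + 1 : Nat) : Int) - c).toNat (m + 1)
          = min ((m : Int) - c).toNat m + 1 := by push_cast; omega
      rw [h1, Function.iterate_succ_apply', Function.iterate_succ_apply',
        Function.iterate_succ_apply']
    · rw [if_neg (by exact_mod_cast hc)]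
      have h1 : min (((m + 1 : Nat) : Int) - c).toNat (m + 1)
          = min ((m : Int) - c).toNat m := by push_cast; omega
      rw [h1, Function.iterate_succ_apply', Function.iterate_succ_apply']

-- ===== VERDICT (by name: the statement is the Claim_ definition above) =====
theorem calculate_encoder_output_dims_spec : Claim_equal_calculate_encoder_output_dims := by
  intro ⟨t, h, w⟩ N _
  show calculate_encoder_output_dims (t, h, w) N = calculate_encoder_output_dims_alt (t, h, w) N
  unfold calculate_encoder_output_dims calculate_encoder_output_dims_alt
  rw [PySem.List.pyRange_one]
  simp only [Int.sub_zero, List.foldl_map, zero_add]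
  have := pvFold_range (N - 2) N.toNat t h w
  simp only [pvHalve] at this
  rw [this]
  have hmax : (max N 0).toNat = N.toNat := by omega
  by_cases hN : 0 ≤ N
  · have h1 : min ((N.toNat : Int) - (N - 2)).toNat N.toNat = (min (max N 0) 2).toNat := by
      omega
    rw [h1, hmax, pvHalve_iterate, pvHalve_iterate, pvHalve_iterate]
  · have h0 : N.toNat = 0 := by omega
    have h2 : (min (max N 0) 2).toNat = 0 := by omega
    rw [h0, h2, hmax, h0]
    simp [PySem.Int.floordiv, Int.fdiv_one]
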